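-- pv_equiv track=rewrite | github.com/xuefenghao5121/KUMF | tools/spe_page_pac.py | _find_contiguous_ranges
-- ===== SOURCE A (Python) =====
-- def _find_contiguous_ranges(pages):
--     """将排序的 page 列表合并为连续范围"""
--     if not pages:
--         return []
--
--     ranges = []
--     start = pages[0]
--     end = pages[0]
--
--     for p in pages[1:]:
--         if p == end + 0x1000:  # 连续 page
--             end = p
--         else:
--             ranges.append((start, end + 0xFFF))
--             start = p
--             end = p
--
--     ranges.append((start, end + 0xFFF))
--     return ranges
-- ===== SOURCE B (Python) =====
-- def _find_contiguous_ranges(pages):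
--     n = len(pages)
--     keys = [p - i * 0x1000 for i, p in enumerate(pages)]
--     bounds = [i for i in range(n) if i == 0 or keys[i] != keys[i - 1]]
--     ends = bounds[1:] + [n]
--     return [(pages[s], pages[e - 1] + 0xFFF) for s, e in zip(bounds, ends)]
-- ===== Notes on version B (the rewrite author's own statement) =====
-- stated objective: alternative
-- what changed: Replaces A's single-pass state machine (mutable start/end carried across the loop) with a stateless staged pipeline: compute grouping keys p - i*0x1000 (constant exactly over a contiguous 0x1000-spaced run), collect the group-boundary indices, and zip consecutive boundaries into (start, end+0xFFF) ranges.
import Mathlib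
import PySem

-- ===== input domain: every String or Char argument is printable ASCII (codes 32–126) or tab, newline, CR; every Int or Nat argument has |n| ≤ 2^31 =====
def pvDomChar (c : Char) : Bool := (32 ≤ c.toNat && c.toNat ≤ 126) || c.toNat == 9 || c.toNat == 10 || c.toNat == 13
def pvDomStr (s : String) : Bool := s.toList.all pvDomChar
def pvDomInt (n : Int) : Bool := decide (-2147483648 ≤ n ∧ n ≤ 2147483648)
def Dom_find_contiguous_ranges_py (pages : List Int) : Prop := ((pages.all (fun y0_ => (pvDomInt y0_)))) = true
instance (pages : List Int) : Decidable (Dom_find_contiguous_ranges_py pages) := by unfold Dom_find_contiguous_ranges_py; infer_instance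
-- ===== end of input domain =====

-- B replaces A's running start/end state machine with a stateless staged pipeline (grouping keys, boundary indices, zipped consecutive boundaries); alternative decomposition, same cost.


-- ===== PORT A =====
-- literal port of A: fold over pages[1:] with state (ranges, start, end), final append
def find_contiguous_ranges_py (pages : List Int) : List (Int × Int) :=
  match pages with
  | [] => []
  | p0 :: rest =>
    let st := rest.foldl
      (fun (s : List (Int × Int) × Int × Int) p =>
        if p = s.2.2 + 0x1000 then (s.1, s.2.1, p)
        else (s.1 ++ [(s.2.1, s.2.2 + 0xFFF)], p, p))
      ([], p0, p0)
    st.1 ++ [(st.2.1, st.2.2 + 0xFFF)]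

-- ===== PORT B =====
-- literal port of Source B: keys list, boundary-index filter, zip of starts with ends
-- (every list index Source B reads is in range, so getD is exact for Python's indexing)
def find_contiguous_ranges_py_alt (pages : List Int) : List (Int × Int) :=
  let n := pages.length
  let keys := pages.zipIdx.map (fun pi => pi.1 - (pi.2 : Int) * 0x1000)
  let bounds := (List.range n).filter
    (fun i => i == 0 || !(keys.getD i 0 == keys.getD (i - 1) 0))
  let ends := bounds.drop 1 ++ [n]
  (bounds.zip ends).map (fun se => (pages.getD se.1 0, pages.getD (se.2 - 1) 0 + 0xFFF))

-- ===== PRECONDITION & SPEC =====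
def Spec_find_contiguous_ranges_py (pages : List Int) (out : List (Int × Int)) : Prop := out = find_contiguous_ranges_py_alt pages
instance (pages : List Int) (out : List (Int × Int)) : Decidable (Spec_find_contiguous_ranges_py pages out) := by unfold Spec_find_contiguous_ranges_py; infer_instance

-- ===== CLAIM (what is proved, stated in full; the proofs are below) =====
def Claim_equal_find_contiguous_ranges_py : Prop := ∀ (pages : List Int), Dom_find_contiguous_ranges_py pages → Spec_find_contiguous_ranges_py pages (find_contiguous_ranges_py pages)

-- ===== LEMMAS AND PROOFS =====

-- A's loop body, named for the lemmas (definitionally the lambda in the port)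
def pvStep (st : List (Int × Int) × Int × Int) (p : Int) : List (Int × Int) × Int × Int :=
  if p = st.2.2 + 0x1000 then (st.1, st.2.1, p)
  else (st.1 ++ [(st.2.1, st.2.2 + 0xFFF)], p, p)

-- functional description of A's loop tail: remaining output from state (start = s, end = e)
def pvGo (s e : Int) : List Int → List (Int × Int)
  | [] => [(s, e + 0xFFF)]
  | p :: l => if p = e + 0x1000 then pvGo s p l else (s, e + 0xFFF) :: pvGo p p l

-- value-level run scanner: (end of the run starting at e over l, pages consumed)
def pvRunScan (e : Int) : List Int → Int × Nat
  | [] => (e, 0)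
  | p :: rest =>
    if p ≠ e + 0x1000 then (e, 0)
    else ((pvRunScan p rest).1, (pvRunScan p rest).2 + 1)

-- run-peeling recursion on the list itself (the common intermediate form)
def pvPeel (pages : List Int) : List (Int × Int) :=
  match pages with
  | [] => []
  | p0 :: rest =>
    let r := pvRunScan p0 rest
    (p0, r.1 + 0xFFF) :: pvPeel (rest.drop r.2)
termination_by pages.length
decreasing_by
  simp only [List.length_cons, List.length_drop]
  omega

-- B's boundary-index list after the key condition is rewritten in terms of pages
def pvBounds (pages : List Int) : List Nat :=
  (List.range pages.length).filter
    (fun i => i == 0 || !(pages.getD i 0 == pages.getD (i - 1) 0 + 0x1000))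

-- ===== A-side lemmas =====

-- A's fold with accumulator acc produces acc ++ pvGo s e l
theorem pvFold_eq_go (l : List Int) (acc : List (Int × Int)) (s e : Int) :
    (l.foldl pvStep (acc, s, e)).1 ++
      [((l.foldl pvStep (acc, s, e)).2.1, (l.foldl pvStep (acc, s, e)).2.2 + 0xFFF)]
    = acc ++ pvGo s e l := by
  induction l generalizing acc s e with
  | nil => simp [pvGo]
  | cons p l ih =>
    simp only [List.foldl_cons, pvGo]
    by_cases h : p = e + 0x1000
    · simp only [pvStep, if_pos h]
      exact ih acc s p
    · simp only [pvStep]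
      rw [if_neg h, if_neg h, ih (acc ++ [(s, e + 0xFFF)]) p p, List.append_assoc]
      rfl

-- pvGo equals the run-peeling recursion
theorem pvGo_eq_peel (l : List Int) (s e : Int) :
    pvGo s e l = (s, (pvRunScan e l).1 + 0xFFF) :: pvPeel (l.drop (pvRunScan e l).2) := by
  induction l generalizing s e with
  | nil => simp [pvGo, pvRunScan, pvPeel]
  | cons p l ih =>
    by_cases h : p = e + 0x1000
    · subst h
      rw [pvGo, if_pos rfl, pvRunScan, if_neg (by simp)]
      rw [ih s (e + 0x1000), List.drop_succ_cons]
    · rw [pvGo, if_neg h, pvRunScan, if_pos h, List.drop_zero]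
      rw [pvPeel, ih p p]

-- ===== run-scanner facts =====

theorem pvRunScan_le (e : Int) (l : List Int) : (pvRunScan e l).2 ≤ l.length := by
  induction l generalizing e with
  | nil => simp [pvRunScan]
  | cons p rest ih =>
    rw [pvRunScan]
    split
    · simp
    · simpa using ih p

theorem pvRunScan_out (e : Int) (l : List Int) :
    (pvRunScan e l).1 = (e :: l).getD (pvRunScan e l).2 0 := by
  induction l generalizing e with
  | nil => simp [pvRunScan]
  | cons p rest ih =>
    rw [pvRunScan]
    split
    · simp
    · simpa using ih p

theorem pvRunScan_chain (e : Int) (l : List Int) :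
    ∀ i, i < (pvRunScan e l).2 → l.getD i 0 = (e :: l).getD i 0 + 0x1000 := by
  induction l generalizing e with
  | nil => simp [pvRunScan]
  | cons p rest ih =>
    intro i hi
    rw [pvRunScan] at hi
    split at hi
    · omega
    · rename_i h
      have hp : p = e + 0x1000 := by omega
      match i with
      | 0 => simpa using hp
      | j + 1 =>
        simp only at hi
        simpa using ih p j (by omega)

theorem pvRunScan_break (e : Int) (l : List Int) :
    (pvRunScan e l).2 < l.length →
      l.getD (pvRunScan e l).2 0 ≠ (pvRunScan e l).1 + 0x1000 := by
  induction l generalizing e with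
  | nil => simp [pvRunScan]
  | cons p rest ih =>
    rw [pvRunScan]
    split
    · intro _; simpa using ‹p ≠ e + 0x1000›
    · intro h
      simp only [List.length_cons] at h
      simpa using ih p (by omega)

-- ===== getD helpers =====

theorem pvGetD_drop (l : List Int) (m j : Nat) :
    (l.drop m).getD j 0 = l.getD (m + j) 0 := by
  simp [List.getD_eq_getElem?_getD, List.getElem?_drop]

-- keys[i] in terms of pages[i], for i < |pages|
theorem pvKeys_getD (pages : List Int) (i : Nat) (hi : i < pages.length) :
    (pages.zipIdx.map (fun pi => pi.1 - (pi.2 : Int) * 0x1000)).getD i 0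
      = pages.getD i 0 - (i : Int) * 0x1000 := by
  have hlen : i < (pages.zipIdx.map (fun pi => pi.1 - (pi.2 : Int) * 0x1000)).length := by
    simpa using hi
  rw [List.getD_eq_getElem _ _ hlen, List.getD_eq_getElem _ _ hi]
  simp

-- B's filter condition over keys equals the condition over pages, inside range n
theorem pvBounds_eq (pages : List Int) :
    (List.range pages.length).filter
      (fun i => i == 0 ||
        !((pages.zipIdx.map (fun pi => pi.1 - (pi.2 : Int) * 0x1000)).getD i 0 ==
          (pages.zipIdx.map (fun pi => pi.1 - (pi.2 : Int) * 0x1000)).getD (i - 1) 0))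
    = pvBounds pages := by
  unfold pvBounds
  apply List.filter_congr
  intro i hi
  have hin : i < pages.length := List.mem_range.mp hi
  match i with
  | 0 => simp
  | j + 1 =>
    have h1 := pvKeys_getD pages (j + 1) hin
    have h2 := pvKeys_getD pages j (by omega)
    have key : (pages.getD (j + 1) 0 - ((j : Int) + 1) * 0x1000
          = pages.getD j 0 - (j : Int) * 0x1000)
        ↔ (pages.getD (j + 1) 0 = pages.getD j 0 + 0x1000) := by
      constructor <;> intro h <;> omega
    simp only [Nat.add_sub_cancel, h1, h2]
    rw [Bool.eq_iff_iff]
    push_cast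
    simp only [Bool.or_eq_true, Bool.not_eq_true', beq_eq_false_iff_ne, ne_eq, key]

-- canonical form of B after the filter rewrite
def pvBaltCanon (pages : List Int) : List (Int × Int) :=
  ((pvBounds pages).zip ((pvBounds pages).drop 1 ++ [pages.length])).map
    (fun se => (pages.getD se.1 0, pages.getD (se.2 - 1) 0 + 0xFFF))

theorem pvBalt_eq_canon (pages : List Int) :
    find_contiguous_ranges_py_alt pages = pvBaltCanon pages := by
  unfold find_contiguous_ranges_py_alt pvBaltCanon
  simp only [pvBounds_eq]

-- ===== bounds structure =====

-- after the leading run of length k, the bounds of pages are 0 followed by the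
-- bounds of the remaining suffix, shifted by k+1
theorem pvBounds_structure (p0 : Int) (rest : List Int) :
    pvBounds (p0 :: rest)
      = 0 :: ((pvBounds (rest.drop (pvRunScan p0 rest).2)).map
          (fun j => (pvRunScan p0 rest).2 + 1 + j)) := by
  rcases hrs : pvRunScan p0 rest with ⟨r1, k⟩
  have hkle : k ≤ rest.length := by
    have := pvRunScan_le p0 rest; rw [hrs] at this; exact this
  have hchain : ∀ i, i < k → rest.getD i 0 = (p0 :: rest).getD i 0 + 0x1000 := by
    intro i hi
    exact pvRunScan_chain p0 rest i (by rw [hrs]; exact hi)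
  have hbreak : k < rest.length → rest.getD k 0 ≠ r1 + 0x1000 := by
    intro h
    have := pvRunScan_break p0 rest (by rw [hrs]; exact h)
    rw [hrs] at this; exact this
  have hout : r1 = (p0 :: rest).getD k 0 := by
    have := pvRunScan_out p0 rest; rw [hrs] at this; exact this
  simp only
  have hsplit : (p0 :: rest).length = (k + 1) + (rest.length - k) := by
    simp only [List.length_cons]; omega
  unfold pvBounds
  rw [hsplit, List.range_add, List.filter_append]
  have hfirst :
      (List.range (k + 1)).filter
        (fun i => i == 0 ||
          !((p0 :: rest).getD i 0 == (p0 :: rest).getD (i - 1) 0 + 0x1000)) = [0] := by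
    rw [List.range_succ_eq_map, List.filter_cons]
    simp only [show ((0 : Nat) == 0 || _) = true by simp]
    rw [List.filter_map]
    have : (List.range k).filter
        ((fun i => i == 0 ||
          !((p0 :: rest).getD i 0 == (p0 :: rest).getD (i - 1) 0 + 0x1000)) ∘ Nat.succ)
        = [] := by
      rw [List.filter_eq_nil_iff]
      intro j hj
      have hjk : j < k := List.mem_range.mp hj
      have hc := hchain j hjk
      simp only [Function.comp_apply, Nat.succ_eq_add_one, Bool.or_eq_true, beq_iff_eq,
        Bool.not_eq_eq_eq_not, Bool.not_true, beq_eq_false_iff_ne, ne_eq,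
        not_or, not_not, Nat.add_sub_cancel]
      refine ⟨by omega, ?_⟩
      simpa using hc
    rw [this]
    simp
  rw [hfirst]
  have hsuffix :
      (List.map (fun j => k + 1 + j) (List.range (rest.length - k))).filter
        (fun i => i == 0 ||
          !((p0 :: rest).getD i 0 == (p0 :: rest).getD (i - 1) 0 + 0x1000))
      = ((pvBounds (rest.drop k)).map (fun j => k + 1 + j)) := by
    rw [List.filter_map]
    unfold pvBounds
    rw [List.length_drop]
    congr 1
    apply List.filter_congr
    intro j hj
    have hjm : j < rest.length - k := List.mem_range.mp hj
    match j with
    | 0 =>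
      have hkr : k < rest.length := by omega
      have hne : ¬ ((p0 :: rest).getD (k + 1) 0 = (p0 :: rest).getD (k + 1 - 1) 0 + 0x1000) := by
        have h1 : (p0 :: rest).getD (k + 1) 0 = rest.getD k 0 := by simp
        have h2 : (p0 :: rest).getD (k + 1 - 1) 0 = (p0 :: rest).getD k 0 := by simp
        rw [h1, h2, ← hout]
        exact hbreak hkr
      simp only [Function.comp_apply, Nat.add_zero]
      rw [Bool.eq_iff_iff]
      simp only [Bool.or_eq_true, beq_iff_eq, Bool.not_eq_true', beq_eq_false_iff_ne, ne_eq]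
      exact iff_of_true (Or.inr hne) (Or.inl trivial)
    | i + 1 =>
      simp only [Function.comp_apply]
      have e1 : (p0 :: rest).getD (k + 1 + (i + 1)) 0 = (rest.drop k).getD (i + 1) 0 := by
        rw [pvGetD_drop, show k + 1 + (i + 1) = (k + (i + 1)) + 1 from by omega]
        simp
      have e2 : (p0 :: rest).getD (k + 1 + (i + 1) - 1) 0
          = (rest.drop k).getD (i + 1 - 1) 0 := by
        rw [pvGetD_drop, show k + 1 + (i + 1) - 1 = (k + i) + 1 from by omega,
          show i + 1 - 1 = i from rfl]
        simp
      rw [e1, e2]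
      rw [Bool.eq_iff_iff]
      simp
  rw [hsuffix]
  rfl

-- every element of the shifted tail of bounds is positive (trivially, by its shape)
theorem pvBounds_tail_pos (k : Nat) (bs : List Nat) :
    ∀ x ∈ bs.map (fun j => k + 1 + j), 1 ≤ x := by
  intro x hx
  rcases List.mem_map.mp hx with ⟨j, _, rfl⟩
  omega

-- ===== main: B's canonical form equals the run-peeling recursion =====

theorem pvCanon_eq_peel (pages : List Int) : pvBaltCanon pages = pvPeel pages := by
  induction hn : pages.length using Nat.strong_induction_on generalizing pages with
  | _ n ih =>
  match pages, hn with
  | [], _ => simp [pvBaltCanon, pvBounds, pvPeel]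
  | p0 :: rest, hn =>
    have hB := pvBounds_structure p0 rest
    rcases hrs : pvRunScan p0 rest with ⟨r1, k⟩
    rw [hrs] at hB
    simp only at hB
    have hkle : k ≤ rest.length := by
      have := pvRunScan_le p0 rest; rw [hrs] at this; exact this
    have hout : r1 = (p0 :: rest).getD k 0 := by
      have := pvRunScan_out p0 rest; rw [hrs] at this; exact this
    rw [pvPeel, hrs]
    simp only
    unfold pvBaltCanon
    rw [hB]
    match hsuf : rest.drop k with
    | [] =>
      have hkeq : k = rest.length := by
        have h := congrArg List.length hsuf
        simp only [List.length_drop, List.length_nil] at h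
        omega
      have hpb : pvBounds ([] : List Int) = [] := by simp [pvBounds]
      rw [hpb]
      simp only [List.map_nil, List.drop_succ_cons, List.drop_zero, List.nil_append,
        List.zip_cons_cons, List.zip_nil_right, List.map_cons, List.map_nil,
        List.getD_cons_zero, pvPeel, List.length_cons, Nat.add_sub_cancel]
      rw [show rest.length = k from hkeq.symm, ← hout]
    | q :: t =>
      have hBsuf := pvBounds_structure q t
      obtain ⟨bs, hbs, hbspos⟩ : ∃ bs, pvBounds (q :: t) = 0 :: bs ∧ ∀ x ∈ bs, 1 ≤ x :=
        ⟨_, hBsuf, pvBounds_tail_pos _ _⟩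
      rw [hbs]
      have hlens : (q :: t).length = rest.length - k := by
        have h := congrArg List.length hsuf
        simpa using h.symm
      have hlen : (p0 :: rest).length = k + 1 + (q :: t).length := by
        simp only [List.length_cons] at hlens ⊢
        omega
      simp only [List.map_cons, Nat.add_zero, List.drop_succ_cons, List.drop_zero,
        List.cons_append, List.zip_cons_cons, List.map_cons]
      congr 1
      · -- head: (pages[0], pages[k+1-1] + 0xFFF) = (p0, r1 + 0xFFF)
        simp only [List.getD_cons_zero, Nat.add_sub_cancel]
        rw [← hout]
      · -- tail: the shifted zip is B's canonical form on the suffix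
        have hshift : ((k + 1) :: bs.map (fun j => k + 1 + j))
            = (0 :: bs).map (fun j => k + 1 + j) := by simp
        have hends : bs.map (fun j => k + 1 + j) ++ [(p0 :: rest).length]
            = (bs ++ [(q :: t).length]).map (fun j => k + 1 + j) := by
          rw [List.map_append]
          congr 1
          simp [hlen]
        rw [hshift, hends, List.zip_map, List.map_map]
        have hpt : ∀ se ∈ ((0 : Nat) :: bs).zip (bs ++ [(q :: t).length]),
            ((fun se => ((p0 :: rest).getD se.1 0, (p0 :: rest).getD (se.2 - 1) 0 + 0xFFF)) ∘
              Prod.map (fun j => k + 1 + j) (fun j => k + 1 + j)) se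
            = ((q :: t).getD se.1 0, (q :: t).getD (se.2 - 1) 0 + 0xFFF) := by
          intro se hse
          obtain ⟨s, e⟩ := se
          have hse2 : e ∈ bs ++ [(q :: t).length] := (List.of_mem_zip hse).2
          have hse2pos : 1 ≤ e := by
            rcases List.mem_append.mp hse2 with h | h
            · exact hbspos _ h
            · simp only [List.mem_singleton] at h
              rw [h]
              simp
          have e1 : (p0 :: rest).getD (k + 1 + s) 0 = (q :: t).getD s 0 := by
            rw [← hsuf, pvGetD_drop, show k + 1 + s = (k + s) + 1 from by omega]
            simp
          have e2 : (p0 :: rest).getD (k + 1 + e - 1) 0 = (q :: t).getD (e - 1) 0 := by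
            rw [← hsuf, pvGetD_drop, show k + 1 + e - 1 = (k + (e - 1)) + 1 from by omega]
            simp
          simp only [Function.comp_apply, Prod.map_apply]
          rw [e1, e2]
        rw [List.map_congr_left hpt]
        have hlt : (q :: t).length < n := by
          rw [← hn]
          simp only [List.length_cons] at hlens ⊢
          omega
        have hih := ih (q :: t).length hlt (q :: t) rfl
        unfold pvBaltCanon at hih
        rw [hbs] at hih
        simpa using hih

-- ===== VERDICT (by name: the statement is the Claim_ definition above) =====
theorem find_contiguous_ranges_py_spec : Claim_equal_find_contiguous_ranges_py := by
  intro pages _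
  unfold Spec_find_contiguous_ranges_py
  rw [pvBalt_eq_canon, pvCanon_eq_peel]
  match pages with
  | [] => simp [find_contiguous_ranges_py, pvPeel]
  | p0 :: rest =>
    show (rest.foldl pvStep ([], p0, p0)).1 ++
        [((rest.foldl pvStep ([], p0, p0)).2.1,
          (rest.foldl pvStep ([], p0, p0)).2.2 + 0xFFF)]
      = pvPeel (p0 :: rest)
    rw [pvFold_eq_go rest [] p0 p0, List.nil_append, pvGo_eq_peel, pvPeel]
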